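-- pv_equiv track=rewrite | github.com/glezo1/pcommonlibs | com/glezo/stringUtils/StringUtils.py | str_split_all_permutations
-- ===== SOURCE A (Python) =====
-- from itertools      import combinations
--
-- def str_split_all_permutations(str_input,separator='|',num_fragments_in_output=1):
--     #based on https://stackoverflow.com/questions/69555581/python-string-split-by-separator-all-possible-permutations/
--     def lst_merge(lst, positions, sep='|'):
--         #merges a list on points other than positions
--         #A, B, C, D and 0, 1 -> A, B, C|D
--         a   =   -1
--         out =   []
--         for b in list(positions)+[len(lst)-1]:
--             out.append('|'.join(lst[a+1:b+1]))
--             a   =   b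
--         return out
--
--     def split_comb(s, sep='|',split=1):
--         l = s.split(sep)
--         return [lst_merge(l, pos, sep=sep)
--                 for pos in combinations(range(len(l)-1), split)]
--
--     if(num_fragments_in_output==0):
--         raise ValueError("num_fragments_in_output shall be > 0")
--     return split_comb(str_input,separator,num_fragments_in_output-1)
-- ===== SOURCE B (Python) =====
-- def str_split_all_permutations(str_input, separator='|', num_fragments_in_output=1):
--     # Recursive decomposition: choose the size of the first fragment, recurse on the rest.
--     # Note: like the original, merged fragments are always joined with '|' (the original's
--     # lst_merge hardcodes '|'), regardless of the separator used for splitting.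
--     if num_fragments_in_output <= 0:
--         raise ValueError("num_fragments_in_output shall be > 0")
--     tokens = str_input.split(separator)
--
--     def groupings(toks, k):
--         if k == 1:
--             return [['|'.join(toks)]]
--         return [['|'.join(toks[:i])] + rest
--                 for i in range(1, len(toks) - k + 2)
--                 for rest in groupings(toks[i:], k - 1)]
--
--     return groupings(tokens, num_fragments_in_output)
-- ===== Notes on version B (the rewrite author's own statement) =====
-- stated objective: alternative
-- what changed: Replaces the combinations-over-gap-positions enumeration plus lst_merge reassembly with a direct recursion that picks the first fragment's size and recurses on the remaining tokens, producing the same compositions in the same order.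
import Mathlib
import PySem

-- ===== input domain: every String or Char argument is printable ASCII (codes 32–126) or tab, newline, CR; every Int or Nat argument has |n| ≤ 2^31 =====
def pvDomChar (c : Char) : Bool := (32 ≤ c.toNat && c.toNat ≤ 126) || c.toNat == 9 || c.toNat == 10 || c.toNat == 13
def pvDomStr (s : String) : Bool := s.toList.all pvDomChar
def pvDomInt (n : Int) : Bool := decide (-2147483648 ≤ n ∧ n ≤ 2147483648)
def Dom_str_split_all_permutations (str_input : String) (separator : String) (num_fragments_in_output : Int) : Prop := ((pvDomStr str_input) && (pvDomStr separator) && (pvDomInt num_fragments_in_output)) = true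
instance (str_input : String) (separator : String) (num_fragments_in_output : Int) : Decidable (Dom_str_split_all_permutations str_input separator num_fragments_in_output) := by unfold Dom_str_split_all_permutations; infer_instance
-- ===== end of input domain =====

-- B replaces A's enumeration of gap-position combinations (plus lst_merge reassembly) with a
-- direct recursion on the size of the first fragment; same results in the same order ("alternative").

-- ===== PORT A =====
-- the for-loop of lst_merge: state is (a, out), iterating over list(positions)+[len(lst)-1]
def pvLstMergeGo (lst : List String) (a : Int) (out : List String) : List Int → List String
  | [] => out
  | b :: bs =>
      pvLstMergeGo lst b
        (out ++ [PySem.Str.join "|" (PySem.List.slice lst (some (a + 1)) (some (b + 1)))]) bs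

def pvLstMerge (lst : List String) (positions : List Int) : List String :=
  pvLstMergeGo lst (-1) [] (positions ++ [(lst.length : Int) - 1])

def str_split_all_permutations (str_input : String) (separator : String) (num_fragments_in_output : Int) : List (List String) :=
  if num_fragments_in_output = 0 then []     -- Python: raise ValueError (excluded by Pre_)
  else
    match PySem.Str.split? str_input separator with
    | none => []                               -- Python: ValueError from split('') (excluded by Pre_)
    | some l =>
        if num_fragments_in_output - 1 < 0 then []   -- Python: ValueError from combinations(_, r<0) (excluded by Pre_)
        else
          (PySem.List.combinations (PySem.List.pyRange 0 ((l.length : Int) - 1))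
              (num_fragments_in_output - 1).toNat).map (fun pos => pvLstMerge l pos)

-- ===== PORT B =====
-- groupings(toks, k): fuel is k itself (Python B only ever calls it with k ≥ 1; fuel 0 is unreachable)
def pvGroupings (tokens : List String) : Nat → List (List String)
  | 0 => []
  | 1 => [[PySem.Str.join "|" tokens]]
  | (k + 2) =>
      (PySem.List.pyRange 1 ((tokens.length : Int) - ((k : Int) + 2) + 2)).flatMap fun i =>
        (pvGroupings (PySem.List.slice tokens (some i) none) (k + 1)).map
          (fun rest => PySem.Str.join "|" (PySem.List.slice tokens none (some i)) :: rest)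

def str_split_all_permutations_alt (str_input : String) (separator : String) (num_fragments_in_output : Int) : List (List String) :=
  if num_fragments_in_output ≤ 0 then []      -- Python: raise ValueError (excluded by Pre_)
  else
    match PySem.Str.split? str_input separator with
    | none => []                               -- Python: ValueError from split('') (excluded by Pre_)
    | some tokens => pvGroupings tokens num_fragments_in_output.toNat

-- ===== PRECONDITION & SPEC =====
-- Pre_ excludes exactly the inputs where A raises ValueError: num_fragments_in_output ≤ 0
-- (explicit raise for 0, combinations(_, r<0) for negatives) and an empty separator (str.split raises).
def Pre_str_split_all_permutations (str_input : String) (separator : String) (num_fragments_in_output : Int) : Prop :=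
  1 ≤ num_fragments_in_output ∧ separator ≠ ""
instance (str_input : String) (separator : String) (num_fragments_in_output : Int) : Decidable (Pre_str_split_all_permutations str_input separator num_fragments_in_output) := by unfold Pre_str_split_all_permutations; infer_instance

def pvWitness_str_split_all_permutations : String × String × Int := ("a|b|c", "|", 2)

def Spec_str_split_all_permutations (str_input : String) (separator : String) (num_fragments_in_output : Int) (out : List (List String)) : Prop := out = str_split_all_permutations_alt str_input separator num_fragments_in_output
instance (str_input : String) (separator : String) (num_fragments_in_output : Int) (out : List (List String)) : Decidable (Spec_str_split_all_permutations str_input separator num_fragments_in_output out) := by unfold Spec_str_split_all_permutations; infer_instance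

-- ===== CLAIM (what is proved, stated in full; the proofs are below) =====
def Claim_equal_str_split_all_permutations : Prop := ∀ (str_input : String) (separator : String) (num_fragments_in_output : Int), Dom_str_split_all_permutations str_input separator num_fragments_in_output → Pre_str_split_all_permutations str_input separator num_fragments_in_output → Spec_str_split_all_permutations str_input separator num_fragments_in_output (str_split_all_permutations str_input separator num_fragments_in_output)

-- ===== LEMMAS AND PROOFS =====

-- the fragments lst_merge produces, written structurally: previous boundary a, internal boundaries ps
def pvF (l : List String) (a : Int) : List Int → List String
  | [] => [PySem.Str.join "|" (PySem.List.slice l (some (a + 1)) (some ((l.length : Int) - 1 + 1)))]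
  | b :: ps => PySem.Str.join "|" (PySem.List.slice l (some (a + 1)) (some (b + 1))) :: pvF l b ps

theorem pvLstMergeGo_spec (l : List String) (ps : List Int) :
    ∀ (a : Int) (out : List String),
      pvLstMergeGo l a out (ps ++ [(l.length : Int) - 1]) = out ++ pvF l a ps := by
  induction ps with
  | nil => intro a out; simp [pvLstMergeGo, pvF]
  | cons b bs ih => intro a out; simp [pvLstMergeGo, pvF, ih]

theorem pvLstMerge_eq_pvF (l : List String) (ps : List Int) :
    pvLstMerge l ps = pvF l (-1) ps := by
  simpa [pvLstMerge] using pvLstMergeGo_spec l ps (-1) []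

-- CPython combinations over a contiguous int range, decomposed by the first chosen element
theorem comb_range_succ :
    ∀ (m : Nat) (a b : Int), b - a = (m : Int) → ∀ (k : Nat),
      PySem.List.combinations (PySem.List.pyRange a b) (k + 1)
        = (PySem.List.pyRange a b).flatMap
            (fun x => (PySem.List.combinations (PySem.List.pyRange (x + 1) b) k).map (x :: ·)) := by
  intro m
  induction m with
  | zero =>
      intro a b hab k
      rw [PySem.List.pyRange_one_eq_nil (by omega)]
      simp [PySem.List.combinations_nil_succ]
  | succ m ih =>
      intro a b hab k
      rw [PySem.List.pyRange_one_cons (by omega)]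
      rw [PySem.List.combinations_cons_succ]
      rw [List.flatMap_cons]
      rw [ih (a + 1) b (by omega) k]

theorem pvGroupings_eq_nil (k : Nat) (t : List String) (h : t.length ≤ k + 1) :
    pvGroupings t (k + 2) = [] := by
  simp only [pvGroupings]
  rw [PySem.List.pyRange_one_eq_nil (by omega)]
  simp

-- main invariant: combinations of boundaries in [s, n-1) merged from previous boundary s-1
-- are exactly B's groupings of the suffix l.drop s into k+1 fragments
theorem pvMain (l : List String) :
    ∀ (k s : Nat), s ≤ l.length →
      (PySem.List.combinations (PySem.List.pyRange (s : Int) ((l.length : Int) - 1)) k).map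
          (pvF l ((s : Int) - 1))
        = pvGroupings (l.drop s) (k + 1) := by
  intro k
  induction k with
  | zero =>
      intro s hs
      rw [PySem.List.combinations_zero]
      simp only [List.map_cons, List.map_nil, pvF]
      have h1 : (s : Int) - 1 + 1 = (s : Int) := by ring
      have h2 : (l.length : Int) - 1 + 1 = ((l.length : Nat) : Int) := by ring
      rw [h1, h2, PySem.List.slice_natCast]
      rw [List.take_of_length_le (by simp)]
      simp [pvGroupings]
  | succ k ih =>
      intro s hs
      by_cases hsn : (l.length : Int) - 1 ≤ (s : Int)
      · -- s = n (or n = 0): both sides empty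
        rw [PySem.List.pyRange_one_eq_nil hsn]
        rcases Nat.eq_zero_or_pos (k + 1) with h | h
        · omega
        · rw [PySem.List.combinations_nil_succ]
          simp only [List.map_nil]
          rcases k with _ | k
          · -- k+1 = 1 impossible here? no: combinations [] 1 = []; RHS pvGroupings _ 2
            rw [pvGroupings_eq_nil 0 (l.drop s) (by simp; omega)]
          · rw [pvGroupings_eq_nil (k + 1) (l.drop s) (by simp; omega)]
      · rw [not_le] at hsn
        -- s < n - 1 on integers, so s + 1 ≤ l.length
        have hslt : s + 1 < l.length := by exact_mod_cast (by omega : (s : Int) + 1 < (l.length : Int))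
        set n := l.length with hn
        -- decompose the combinations by the first boundary
        have hm : ((n : Int) - 1) - (s : Int) = ((n - 1 - s : Nat) : Int) := by omega
        rw [comb_range_succ (n - 1 - s) (s : Int) ((n : Int) - 1) (by omega) k]
        rw [List.map_flatMap]
        -- both sides as flatMaps over List.range
        rw [PySem.List.pyRange_one (s : Int) ((n : Int) - 1)]
        rw [List.flatMap_map]
        have hmnat : (((n : Int) - 1) - (s : Int)).toNat = n - 1 - s := by omega
        rw [hmnat]
        -- pointwise rewrite of each bucket via the induction hypothesis
        have hbucket : ∀ j ∈ List.range (n - 1 - s),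
            ((PySem.List.combinations
                (PySem.List.pyRange ((s : Int) + (j : Int) + 1) ((n : Int) - 1)) k).map (pvF l ((s : Int) - 1) ∘ (((s : Int) + (j : Int)) :: ·)))
              = (pvGroupings (l.drop (s + j + 1)) (k + 1)).map
                  (fun rest => PySem.Str.join "|" ((l.drop s).take (j + 1)) :: rest) := by
          intro j hj
          rw [List.mem_range] at hj
          have hsj : s + j + 1 ≤ n := by omega
          have e1 : (s : Int) + (j : Int) + 1 = ((s + j + 1 : Nat) : Int) := by push_cast; ring
          have e2 : (s : Int) + (j : Int) = ((s + j + 1 : Nat) : Int) - 1 := by push_cast; ring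
          have efrag : PySem.List.slice l (some ((s : Int) - 1 + 1)) (some ((s : Int) + (j : Int) + 1))
              = (l.drop s).take (j + 1) := by
            have : (s : Int) - 1 + 1 = ((s : Nat) : Int) := by ring
            rw [this, e1, PySem.List.slice_natCast]
            congr 1
            omega
          calc ((PySem.List.combinations
                (PySem.List.pyRange ((s : Int) + (j : Int) + 1) ((n : Int) - 1)) k).map (pvF l ((s : Int) - 1) ∘ (((s : Int) + (j : Int)) :: ·)))
              = ((PySem.List.combinations
                (PySem.List.pyRange ((s : Int) + (j : Int) + 1) ((n : Int) - 1)) k).map (pvF l ((s : Int) + (j : Int)))).map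
                  (fun rest => PySem.Str.join "|" ((l.drop s).take (j + 1)) :: rest) := by
                  rw [List.map_map]
                  apply List.map_congr_left
                  intro ps _
                  simp only [Function.comp_apply, pvF, efrag]
            _ = (pvGroupings (l.drop (s + j + 1)) (k + 1)).map
                  (fun rest => PySem.Str.join "|" ((l.drop s).take (j + 1)) :: rest) := by
                  rw [e1, e2, ih (s + j + 1) hsj]
        simp only [List.map_map]
        rw [List.flatMap_congr hbucket]
        -- now the right-hand side
        have hlen : (l.drop s).length = n - s := by simp [hn]
        simp only [pvGroupings, hlen]
        have hns : ((n - s : Nat) : Int) = (n : Int) - (s : Int) := by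
          push_cast [Nat.cast_sub hs]; ring
        rw [PySem.List.pyRange_one 1 (((n - s : Nat) : Int) - ((k : Int) + 2) + 2)]
        rw [List.flatMap_map]
        have hm' : (((n - s : Nat) : Int) - ((k : Int) + 2) + 2 - 1).toNat = n - 1 - s - k := by
          omega
        rw [hm']
        set m2 := n - 1 - s - k with hm2
        have hsplit : n - 1 - s = m2 + ((n - 1 - s) - m2) := by omega
        rw [hsplit, List.range_add, List.flatMap_append]
        have htail : ((List.range ((n - 1 - s) - m2)).map (fun x => m2 + x)).flatMap
            (fun j => (pvGroupings (l.drop (s + j + 1)) (k + 1)).map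
              (fun rest => PySem.Str.join "|" ((l.drop s).take (j + 1)) :: rest)) = [] := by
          rw [List.flatMap_map]
          rw [List.flatMap_eq_nil_iff]
          intro x hx
          rw [List.mem_range] at hx
          rcases k with _ | k'
          · omega
          · rw [pvGroupings_eq_nil k' (l.drop (s + (m2 + x) + 1)) (by simp; omega)]
            simp
        rw [htail, List.append_nil]
        apply List.flatMap_congr
        intro j hj
        rw [List.mem_range] at hj
        have e3 : (1 : Int) + (j : Int) = ((1 + j : Nat) : Int) := by push_cast; ring
        rw [e3, PySem.List.slice_from_natCast, PySem.List.slice_to_natCast]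
        rw [List.drop_drop]
        rw [Nat.add_comm 1 j, ← Nat.add_assoc]

-- ===== VERDICT (by name: the statement is the Claim_ definition above) =====
theorem str_split_all_permutations_spec : Claim_equal_str_split_all_permutations := by
  intro str_input separator num hdom hpre
  obtain ⟨h1, hsep⟩ := hpre
  unfold Spec_str_split_all_permutations
  unfold str_split_all_permutations str_split_all_permutations_alt
  rw [if_neg (by omega : ¬ num = 0), if_neg (by omega : ¬ num ≤ 0)]
  have hne : PySem.Str.split? str_input separator ≠ none := by
    have hT : separator.toList ≠ [] := fun h => hsep (String.toList_eq_nil_iff.mp h)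
    simp [PySem.Str.split?, PySem.Chars.split?, List.isEmpty_iff, hT]
  obtain ⟨l, hl⟩ := Option.ne_none_iff_exists'.mp hne
  rw [hl]
  dsimp only
  rw [if_neg (by omega : ¬ num - 1 < 0)]
  have hmain := pvMain l (num - 1).toNat 0 (Nat.zero_le _)
  simp only [Nat.cast_zero, zero_sub, List.drop_zero] at hmain
  have hk : (num - 1).toNat + 1 = num.toNat := by omega
  rw [hk] at hmain
  rw [← hmain]
  exact List.map_congr_left fun ps _ => pvLstMerge_eq_pvF l ps
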